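-- pv_equiv track=rewrite | github.com/daniel159357/DATA-SCIENCE-FOUNDATIONS-Hurricane-Analysis | script.py | year_dict
-- ===== SOURCE A (Python) =====
-- def year_dict(dict):
--     hurricane_years = {}
--     #for loop that checks if year in hurricane_years, and adds data
--     for data in dict.values():
--         for year, lst in hurricane_years.items():
--             if data['Year'] == year:
--                 lst.append(data)
--         hurricane_years.update({data['Year']: [data]})
--     return hurricane_years
-- ===== SOURCE B (Python) =====
-- def year_dict(dict):
--     # Single pass: direct last-wins assignment, no inner scan over accumulated years.
--     result = {}
--     for data in dict.values():
--         result[data['Year']] = [data]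
--     return result
-- ===== Notes on version B (the rewrite author's own statement) =====
-- stated objective: simpler
-- what changed: B replaces A's nested scan-and-append over the accumulated years (whose effect is always erased by the subsequent overwrite) with a single pass that directly assigns a singleton list for each item's year, last item per year winning.
import Mathlib
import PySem

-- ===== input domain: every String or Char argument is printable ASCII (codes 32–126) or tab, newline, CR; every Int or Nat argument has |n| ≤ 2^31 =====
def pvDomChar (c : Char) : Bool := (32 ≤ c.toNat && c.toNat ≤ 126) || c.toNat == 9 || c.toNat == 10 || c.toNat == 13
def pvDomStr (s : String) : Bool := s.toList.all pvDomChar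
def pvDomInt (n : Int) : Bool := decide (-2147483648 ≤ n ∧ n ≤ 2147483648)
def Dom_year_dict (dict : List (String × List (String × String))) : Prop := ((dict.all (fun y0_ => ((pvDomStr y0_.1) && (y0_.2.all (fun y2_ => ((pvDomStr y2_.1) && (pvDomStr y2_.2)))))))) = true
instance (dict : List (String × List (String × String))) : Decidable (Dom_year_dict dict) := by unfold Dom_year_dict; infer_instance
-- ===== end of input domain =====

-- B drops A's inner scan over the accumulated years (its appends are always erased by the
-- subsequent overwrite) and does one pass of direct last-wins assignment: simpler, same result.

-- ===== PORT A =====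
def year_dict (dict : List (String × List (String × String))) : List (String × List (List (String × String))) :=
  let hy : PySem.Dict String (List (List (String × String))) :=
    (PySem.Dict.ofList dict).values.foldl
      (fun h data =>
        let d := PySem.Dict.ofList data
        let y := d.getD "Year" ""   -- data['Year']; Pre_ guarantees the key is present
        -- inner loop: for year, lst in hurricane_years.items(): if data['Year'] == year: lst.append(data)
        let h' := PySem.Dict.mk (h.items.map (fun p => if y == p.1 then (p.1, p.2 ++ [d.items]) else p))
        -- hurricane_years.update({data['Year']: [data]})
        h'.insert y [d.items])
      PySem.Dict.empty
  hy.items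

-- ===== PORT B =====
def year_dict_alt (dict : List (String × List (String × String))) : List (String × List (List (String × String))) :=
  ((PySem.Dict.ofList dict).values.foldl
      (fun h data =>
        let d := PySem.Dict.ofList data
        h.insert (d.getD "Year" "") [d.items])
      PySem.Dict.empty).items

-- ===== PRECONDITION & SPEC =====
-- Pre_ excludes exactly the inputs where some value dict lacks the key 'Year': there A raises KeyError.
def Pre_year_dict (dict : List (String × List (String × String))) : Prop :=
  ((PySem.Dict.ofList dict).values.all (fun data => (PySem.Dict.ofList data).contains "Year")) = true
instance (dict : List (String × List (String × String))) : Decidable (Pre_year_dict dict) := by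
  unfold Pre_year_dict; infer_instance

def pvWitness_year_dict : (List (String × List (String × String))) :=
  [("a", [("Year", "2000"), ("Name", "x")]), ("b", [("Year", "2000")])]

def Spec_year_dict (dict : List (String × List (String × String))) (out : List (String × List (List (String × String)))) : Prop := out = year_dict_alt dict
instance (dict : List (String × List (String × String))) (out : List (String × List (List (String × String)))) : Decidable (Spec_year_dict dict out) := by unfold Spec_year_dict; infer_instance

-- ===== CLAIM (what is proved, stated in full; the proofs are below) =====
def Claim_equal_year_dict : Prop := ∀ (dict : List (String × List (String × String))), Dom_year_dict dict → Pre_year_dict dict → Spec_year_dict dict (year_dict dict)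

-- ===== LEMMAS AND PROOFS =====
theorem pv_foldl_ext {α β : Type} (f g : β → α → β) (l : List α) (b : β)
    (h : ∀ b a, f b a = g b a) : l.foldl f b = l.foldl g b := by
  induction l generalizing b with
  | nil => rfl
  | cons x xs ih => simp only [List.foldl_cons, h]; exact ih _

-- A's inner scan-and-append step followed by the overwrite equals the plain overwrite.
theorem pv_step_eq (h : PySem.Dict String (List (List (String × String)))) (y : String)
    (v : List (List (String × String))) :
    (PySem.Dict.mk (h.items.map (fun p => if y == p.1 then (p.1, p.2 ++ v) else p))).insert y v
      = h.insert y v := by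
  apply PySem.Dict.ext
  have hkeys : (PySem.Dict.mk (h.items.map
      (fun p => if y == p.1 then (p.1, p.2 ++ v) else p))).keys = h.keys := by
    simp only [PySem.Dict.keys, List.map_map]
    apply List.map_congr_left
    intro p _
    by_cases hp : y = p.1 <;> simp [hp]
  by_cases hc : y ∈ h.keys
  · have h1 : (PySem.Dict.mk (h.items.map
        (fun p => if y == p.1 then (p.1, p.2 ++ v) else p))).contains y = true := by
      rw [PySem.Dict.contains_iff_mem_keys, hkeys]; exact hc
    have h2 : h.contains y = true := by rw [PySem.Dict.contains_iff_mem_keys]; exact hc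
    rw [PySem.Dict.items_insert, PySem.Dict.items_insert, h1, h2]
    simp only [List.map_map]
    apply List.map_congr_left
    intro p _
    by_cases hp : p.1 = y
    · simp [hp]
    · simp [hp, Ne.symm hp]
  · have h1 : (PySem.Dict.mk (h.items.map
        (fun p => if y == p.1 then (p.1, p.2 ++ v) else p))).contains y = false := by
      rw [Bool.eq_false_iff]
      intro hcon
      exact hc (by rw [← hkeys, ← PySem.Dict.contains_iff_mem_keys]; exact hcon)
    have h2 : h.contains y = false := by
      rw [Bool.eq_false_iff]
      intro hcon
      exact hc (by rw [← PySem.Dict.contains_iff_mem_keys]; exact hcon)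
    have hmapid : List.map (fun p => if y = p.1 then (p.1, p.2 ++ v) else p) h.items = h.items := by
      have h' : ∀ p ∈ h.items, (if y = p.1 then (p.1, p.2 ++ v) else p) = id p := by
        intro p hp
        have hne : p.1 ≠ y := by
          intro hx
          exact hc (by simpa [PySem.Dict.keys, ← hx] using List.mem_map_of_mem (f := (·.1)) hp)
        simp [Ne.symm hne]
      simpa using List.map_congr_left h'
    rw [PySem.Dict.items_insert, PySem.Dict.items_insert, h1, h2]
    simp [hmapid]

-- ===== VERDICT (by name: the statement is the Claim_ definition above) =====
theorem year_dict_spec : Claim_equal_year_dict := by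
  intro dict _ _
  unfold Spec_year_dict year_dict year_dict_alt
  simp only []
  congr 1
  apply pv_foldl_ext
  intro h data
  exact pv_step_eq h _ _
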